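-- pv_equiv track=rewrite | github.com/Wotty/advent-of-code | coding.py | normalise_hierarchy
-- ===== SOURCE A (Python) =====
-- def normalise_hierarchy(relations, parent='Vodafone'):
--     try:
--         children = relations[parent]
--         for child in children:
--             sub_hierarchy = normalise_hierarchy(relations, child)
--             for element in sub_hierarchy:
--                 try:
--                     yield (parent, *element)
--                 except TypeError:
--                     yield (parent, child)
--     except KeyError:
--         yield None
-- ===== SOURCE B (Python) =====
-- def normalise_hierarchy(relations, parent='Vodafone'):
--     # Iterative explicit-stack DFS instead of A's nested recursive generators.
--     try:
--         children = relations[parent]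
--     except KeyError:
--         yield None
--         return
--     stack = [(parent, child) for child in reversed(children)]
--     while stack:
--         path = stack.pop()
--         try:
--             kids = relations[path[-1]]
--         except KeyError:
--             yield path            # leaf: a key absent from the dict
--             continue
--         for child in reversed(kids):
--             stack.append(path + (child,))
-- ===== Notes on version B (the rewrite author's own statement) =====
-- stated objective: alternative
-- what changed: A is a recursive generator that rebuilds every sub-path bottom-up at each level, prepending the parent and turning a None sentinel into (parent, child) via a caught TypeError; B is an iterative explicit-stack DFS that pops partial paths, extends them with children (pushed reversed to keep A's left-to-right order) and yields complete paths at absent-key leaves.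
import Mathlib
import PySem

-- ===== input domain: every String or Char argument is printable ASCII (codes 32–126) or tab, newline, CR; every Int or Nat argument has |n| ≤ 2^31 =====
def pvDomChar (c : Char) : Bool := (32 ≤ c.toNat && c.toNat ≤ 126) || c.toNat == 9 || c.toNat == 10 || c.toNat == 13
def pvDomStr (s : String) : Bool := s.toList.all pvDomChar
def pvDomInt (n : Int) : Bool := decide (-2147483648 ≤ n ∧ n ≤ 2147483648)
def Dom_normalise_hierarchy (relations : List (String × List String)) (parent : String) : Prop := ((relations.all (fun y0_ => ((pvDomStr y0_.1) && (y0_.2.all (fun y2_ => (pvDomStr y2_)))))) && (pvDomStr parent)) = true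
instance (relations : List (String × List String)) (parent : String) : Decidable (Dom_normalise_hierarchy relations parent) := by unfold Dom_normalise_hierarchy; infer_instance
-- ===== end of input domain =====

-- B replaces A's nested recursive generators (which rebuild every sub-path bottom-up, turning a
-- None sentinel into (parent, child) via a caught TypeError) by an iterative explicit-stack DFS
-- that pops partial paths and extends or yields them; objective: alternative, no speed claim.

-- dict lookup, first match (the assoc list stands for a Python dict, so keys are unique on Pre_)
def pvLookup (relations : List (String × List String)) (k : String) : Option (List String) :=
  (relations.find? (fun p => p.1 == k)).map (fun p => p.2)

-- ===== PORT A =====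
-- Python A recurses on the dict; on cyclic inputs it never returns (RecursionError), so the
-- port carries a fuel counter as a pure totality guard: relations.length + 1 recursion levels
-- suffice on every input admitted by Pre_ (acyclic, distinct keys).
def normalise_hierarchy_go (relations : List (String × List String)) : Nat → String → List (Option (List String))
  | 0, _ => []
  | fuel + 1, parent =>
    match pvLookup relations parent with
    | none => [none]                                   -- except KeyError: yield None
    | some children =>
      children.flatMap (fun child =>
        (normalise_hierarchy_go relations fuel child).map (fun element =>
          match element with
          | some l => some (parent :: l)               -- yield (parent, *element)
          | none => some [parent, child]))             -- except TypeError: yield (parent, child)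

def normalise_hierarchy (relations : List (String × List String)) (parent : String) : List (Option (List String)) :=
  normalise_hierarchy_go relations (relations.length + 1) parent

-- ===== PORT B =====
-- the largest children list in the dict; used only to justify termination of the stack loop
def pvMaxKids (relations : List (String × List String)) : Nat :=
  (relations.map (fun p => p.2.length)).foldr max 0

-- a children list found in the dict is no longer than pvMaxKids (cited by pvLoop's decreasing_by)
theorem pvLookup_len_le (relations : List (String × List String)) (k : String)
    (kids : List String) (h : pvLookup relations k = some kids) :
    kids.length ≤ pvMaxKids relations := by
  induction relations with
  | nil => simp [pvLookup] at h
  | cons p rest ih =>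
    by_cases hp : p.1 == k
    · simp [pvLookup, List.find?, hp] at h
      simp [pvMaxKids, ← h]
    · simp only [pvLookup, List.find?, hp] at h
      exact le_trans (ih h) (by simp [pvMaxKids])

-- Source B's while-loop over the explicit stack (stack top = list head: Python pushes the children
-- reversed at the end and pops from the end, which is prepending them in order here).  Python B
-- loops forever on a cycle, so each stack entry carries a depth budget as a pure totality
-- guard; it is never exhausted for the budgets normalise_hierarchy_alt supplies on the acyclic
-- inputs Pre_ admits.  path[-1] is pyGet? path (-1); its none case is unreachable because every
-- pushed path is nonempty.
def pvLoop (relations : List (String × List String)) :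
    List (List String × Nat) → List (Option (List String))
  | [] => []
  | (path, b) :: rest =>
    match PySem.List.pyGet? path (-1) with
    | none => pvLoop relations rest
    | some node =>
      match h : pvLookup relations node with
      | none => some path :: pvLoop relations rest     -- leaf: yield path
      | some kids =>
        match b with
        | 0 => pvLoop relations rest
        | b' + 1 => pvLoop relations ((kids.map (fun c => (path ++ [c], b'))) ++ rest)
  termination_by st => (st.map (fun e => (pvMaxKids relations + 1) ^ e.2)).sum
  decreasing_by
  all_goals simp only [List.map_cons, List.sum_cons, List.map_append, List.map_map, List.sum_append]
  · exact Nat.lt_add_of_pos_left (Nat.pow_pos (Nat.succ_pos _))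
  · exact Nat.lt_add_of_pos_left (Nat.pow_pos (Nat.succ_pos _))
  · have hk : kids.length ≤ pvMaxKids relations := pvLookup_len_le relations node kids h
    have hp : 0 < (pvMaxKids relations + 1) ^ b' := Nat.pow_pos (Nat.succ_pos _)
    have h1 : (List.map ((fun e => (pvMaxKids relations + 1) ^ e.2) ∘ fun c => (path ++ [c], b')) kids).sum
        = kids.length * (pvMaxKids relations + 1) ^ b' := by
      simp only [Function.comp_def]
      rw [List.map_const', List.sum_replicate, smul_eq_mul]
    have h4 : kids.length * (pvMaxKids relations + 1) ^ b' < (pvMaxKids relations + 1) ^ (b' + 1) := by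
      rw [pow_succ]
      calc kids.length * (pvMaxKids relations + 1) ^ b'
          ≤ pvMaxKids relations * (pvMaxKids relations + 1) ^ b' := Nat.mul_le_mul_right _ hk
        _ < (pvMaxKids relations + 1) * (pvMaxKids relations + 1) ^ b' :=
            Nat.mul_lt_mul_of_pos_right (Nat.lt_succ_self _) hp
        _ = (pvMaxKids relations + 1) ^ b' * (pvMaxKids relations + 1) := mul_comm _ _
    rw [h1]
    exact Nat.add_lt_add_right h4 _

def normalise_hierarchy_alt (relations : List (String × List String)) (parent : String) : List (Option (List String)) :=
  match pvLookup relations parent with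
  | none => [none]                                     -- absent root: yield None and stop
  | some children =>
      pvLoop relations (children.map (fun c => ([parent, c], relations.length - 1)))

-- ===== PRECONDITION & SPEC =====
-- successor set and bounded reachability closure for the acyclicity condition
def pvChildren (relations : List (String × List String)) (k : String) : List (String) :=
  (pvLookup relations k).getD []
def pvReach (relations : List (String × List String)) (start : List String) : List String :=
  ((fun S => (S ++ S.flatMap (pvChildren relations)).dedup)^[relations.length]) start

-- Pre_ excludes (a) cyclic inputs reachable from parent, on which Python A raises
-- RecursionError (and Python B loops forever), and (b) assoc lists with duplicate keys, which
-- cannot arise from a real Python dict (Python keeps the last value, the assoc-list convention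
-- the first).
def Pre_normalise_hierarchy (relations : List (String × List String)) (parent : String) : Prop :=
  (relations.map Prod.fst).Nodup ∧
  ∀ k ∈ pvReach relations [parent], k ∉ pvReach relations (pvChildren relations k)
instance (relations : List (String × List String)) (parent : String) : Decidable (Pre_normalise_hierarchy relations parent) := by unfold Pre_normalise_hierarchy; infer_instance

def pvWitness_normalise_hierarchy : (List (String × List String)) × String :=
  ([("a", ["b", "c"]), ("b", ["c"])], "a")

def Spec_normalise_hierarchy (relations : List (String × List String)) (parent : String) (out : List (Option (List String))) : Prop := out = normalise_hierarchy_alt relations parent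
instance (relations : List (String × List String)) (parent : String) (out : List (Option (List String))) : Decidable (Spec_normalise_hierarchy relations parent out) := by unfold Spec_normalise_hierarchy; infer_instance

-- ===== CLAIM (what is proved, stated in full; the proofs are below) =====
def Claim_equal_normalise_hierarchy : Prop := ∀ (relations : List (String × List String)) (parent : String), Dom_normalise_hierarchy relations parent → Pre_normalise_hierarchy relations parent → Spec_normalise_hierarchy relations parent (normalise_hierarchy relations parent)

-- ===== LEMMAS AND PROOFS =====

-- unfolding lemmas for pvLoop (its dependent match blocks simp, so we split once here)
theorem pvLoop_leaf (relations : List (String × List String)) (path : List String)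
    (node : String) (b : Nat) (rest : List (List String × Nat))
    (hg : PySem.List.pyGet? path (-1) = some node) (h : pvLookup relations node = none) :
    pvLoop relations ((path, b) :: rest) = some path :: pvLoop relations rest := by
  rw [pvLoop]
  simp only [hg]
  split
  · rfl
  · simp_all

theorem pvLoop_zero (relations : List (String × List String)) (path : List String)
    (node : String) (kids : List String) (rest : List (List String × Nat))
    (hg : PySem.List.pyGet? path (-1) = some node) (h : pvLookup relations node = some kids) :
    pvLoop relations ((path, 0) :: rest) = pvLoop relations rest := by
  rw [pvLoop]
  simp only [hg]
  split
  · simp_all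
  · rfl

theorem pvLoop_expand (relations : List (String × List String)) (path : List String)
    (node : String) (kids : List String) (b' : Nat) (rest : List (List String × Nat))
    (hg : PySem.List.pyGet? path (-1) = some node) (h : pvLookup relations node = some kids) :
    pvLoop relations ((path, b' + 1) :: rest) =
      pvLoop relations ((kids.map (fun c => (path ++ [c], b'))) ++ rest) := by
  rw [pvLoop]
  simp only [hg]
  split
  · simp_all
  · rename_i kids' heq
    rw [h] at heq
    injection heq with e
    subst e
    rfl

-- popping one nonempty path (prefix ++ [node]) with budget b produces exactly what A's
-- recursion with fuel b + 1 produces from node, each result prefixed, then the rest of the stack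
theorem pvLoop_cons (relations : List (String × List String)) :
    ∀ (b : Nat) (prefix_ : List String) (node : String) (rest : List (List String × Nat)),
      pvLoop relations ((prefix_ ++ [node], b) :: rest) =
        ((normalise_hierarchy_go relations (b + 1) node).map
          (fun e => some (prefix_ ++ e.getD [node]))) ++ pvLoop relations rest := by
  intro b
  induction b with
  | zero =>
    intro prefix_ node rest
    cases h : pvLookup relations node with
    | none =>
      rw [pvLoop_leaf relations _ node 0 rest (PySem.List.pyGet?_neg_one_append_singleton _ _) h]
      simp [normalise_hierarchy_go, h]
    | some kids =>
      rw [pvLoop_zero relations _ node kids rest (PySem.List.pyGet?_neg_one_append_singleton _ _) h]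
      simp [normalise_hierarchy_go, h]
  | succ b ih =>
    intro prefix_ node rest
    cases h : pvLookup relations node with
    | none =>
      rw [pvLoop_leaf relations _ node (b + 1) rest (PySem.List.pyGet?_neg_one_append_singleton _ _) h]
      simp [normalise_hierarchy_go, h]
    | some kids =>
      rw [pvLoop_expand relations _ node kids b rest (PySem.List.pyGet?_neg_one_append_singleton _ _) h]
      have hstep : ∀ (ks : List String) (rest : List (List String × Nat)),
          pvLoop relations (ks.map (fun c => (prefix_ ++ [node] ++ [c], b)) ++ rest) =
            ks.flatMap (fun c =>
              (normalise_hierarchy_go relations (b + 1) c).map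
                (fun e => some ((prefix_ ++ [node]) ++ e.getD [c]))) ++ pvLoop relations rest := by
        intro ks
        induction ks with
        | nil => intro rest; simp
        | cons c ks' ihk =>
          intro rest
          simp only [List.map_cons, List.cons_append, List.flatMap_cons]
          rw [ih (prefix_ ++ [node]) c, ihk, List.append_assoc]
      rw [hstep]
      simp only [normalise_hierarchy_go, h, List.map_flatMap, List.map_map]
      congr 1
      refine List.flatMap_congr (fun child _ => ?_)
      refine List.map_congr_left (fun e _ => ?_)
      cases e <;> simp

-- lookup succeeding forces a nonempty dict (so relations.length - 1 + 1 = relations.length)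
theorem pvLookup_ne_nil (relations : List (String × List String)) (k : String)
    (v : List String) (h : pvLookup relations k = some v) : relations ≠ [] := by
  intro hn; subst hn; simp [pvLookup] at h

-- the whole initial stack: one entry per child of the root
theorem pvLoop_stack (relations : List (String × List String)) (b : Nat) :
    ∀ (kids : List String) (path : List String),
      pvLoop relations (kids.map (fun c => (path ++ [c], b))) =
        kids.flatMap (fun c =>
          (normalise_hierarchy_go relations (b + 1) c).map
            (fun e => some (path ++ e.getD [c]))) := by
  intro kids path
  induction kids with
  | nil => simp [pvLoop]
  | cons c kids' ihk =>
    simp only [List.map_cons, List.flatMap_cons]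
    have := pvLoop_cons relations b path c (kids'.map (fun c => (path ++ [c], b)))
    rw [this, ihk]

-- ===== VERDICT (by name: the statement is the Claim_ definition above) =====
theorem normalise_hierarchy_spec : Claim_equal_normalise_hierarchy := by
  intro relations parent _ _
  unfold Spec_normalise_hierarchy normalise_hierarchy normalise_hierarchy_alt
  cases h : pvLookup relations parent with
  | none => simp [normalise_hierarchy_go, h]
  | some children =>
    dsimp only
    have hne : relations ≠ [] := pvLookup_ne_nil relations parent children h
    have hlen : relations.length - 1 + 1 = relations.length := by
      cases relations with
      | nil => exact absurd rfl hne
      | cons _ _ => simp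
    have hstack := pvLoop_stack relations (relations.length - 1) children [parent]
    rw [hlen] at hstack
    have : children.map (fun c => (([parent] : List String) ++ [c], relations.length - 1))
        = children.map (fun c => (([parent, c] : List String), relations.length - 1)) := by
      simp
    rw [this] at hstack
    rw [hstack]
    simp only [normalise_hierarchy_go, h]
    refine List.flatMap_congr (fun child _ => ?_)
    refine List.map_congr_left (fun e _ => ?_)
    cases e <;> simp
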